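-- pv_equiv track=rewrite | github.com/palamut62/tweet_otomation | utils.py | generate_smart_emojis
-- ===== SOURCE A (Python) =====
-- def generate_smart_emojis(title, content):
--     """Makale içeriğine göre akıllı emoji seçimi"""
--     combined_text = f"{title.lower()} {content.lower()}"
--     emojis = []
--
--     # Konu bazlı emojiler
--     if any(keyword in combined_text for keyword in ["ai", "artificial intelligence", "robot", "machine learning"]):
--         emojis.extend(["🤖", "🧠", "⚡"])
--     if any(keyword in combined_text for keyword in ["funding", "investment", "billion", "million", "money"]):
--         emojis.extend(["💰", "💸", "📈"])
--     if any(keyword in combined_text for keyword in ["launch", "release", "unveil", "announce"]):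
--         emojis.extend(["🚀", "🎉", "✨"])
--     if any(keyword in combined_text for keyword in ["research", "development", "breakthrough", "discovery"]):
--         emojis.extend(["🔬", "💡", "🧪"])
--     if any(keyword in combined_text for keyword in ["security", "privacy", "protection", "safe"]):
--         emojis.extend(["🔒", "🛡️", "🔐"])
--     if any(keyword in combined_text for keyword in ["acquisition", "merger", "partnership"]):
--         emojis.extend(["🤝", "🔗", "💼"])
--     if any(keyword in combined_text for keyword in ["search", "query", "find", "discover"]):
--         emojis.extend(["🔍", "🔎", "📊"])
--     if any(keyword in combined_text for keyword in ["mobile", "phone", "app", "smartphone"]):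
--         emojis.extend(["📱", "📲", "💻"])
--     if any(keyword in combined_text for keyword in ["cloud", "server", "data", "storage"]):
--         emojis.extend(["☁️", "💾", "🗄️"])
--     if any(keyword in combined_text for keyword in ["game", "gaming", "entertainment"]):
--         emojis.extend(["🎮", "🕹️", "🎯"])
--
--     # Eğer emoji bulunamadıysa varsayılan emojiler
--     if not emojis:
--         emojis = ["🚀", "💻", "🌟", "⚡", "🔥"]
--
--     # En fazla 3 emoji seç
--     return emojis[:3]
-- ===== SOURCE B (Python) =====
-- _EMOJI_TABLE = [
--     (("ai", "artificial intelligence", "robot", "machine learning"), ("🤖", "🧠", "⚡")),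
--     (("funding", "investment", "billion", "million", "money"), ("💰", "💸", "📈")),
--     (("launch", "release", "unveil", "announce"), ("🚀", "🎉", "✨")),
--     (("research", "development", "breakthrough", "discovery"), ("🔬", "💡", "🧪")),
--     (("security", "privacy", "protection", "safe"), ("🔒", "🛡️", "🔐")),
--     (("acquisition", "merger", "partnership"), ("🤝", "🔗", "💼")),
--     (("search", "query", "find", "discover"), ("🔍", "🔎", "📊")),
--     (("mobile", "phone", "app", "smartphone"), ("📱", "📲", "💻")),
--     (("cloud", "server", "data", "storage"), ("☁️", "💾", "🗄️")),
--     (("game", "gaming", "entertainment"), ("🎮", "🕹️", "🎯")),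
-- ]
--
--
-- def generate_smart_emojis(title, content):
--     """Makale içeriğine göre akıllı emoji seçimi"""
--     text = f"{title.lower()} {content.lower()}"
--     # Each category supplies exactly 3 emojis, so the first matching
--     # category alone determines the (at most 3) returned emojis.
--     for keywords, trio in _EMOJI_TABLE:
--         if any(k in text for k in keywords):
--             return list(trio)
--     return ["🚀", "💻", "🌟"]
-- ===== Notes on version B (the rewrite author's own statement) =====
-- stated objective: idiomatic
-- what changed: Replaces ten hard-coded if/extend blocks plus a final truncation by one ordered (keywords, emoji-triple) table scanned with early exit on the first matching category, which is sound because every category contributes exactly 3 emojis.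
import Mathlib
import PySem

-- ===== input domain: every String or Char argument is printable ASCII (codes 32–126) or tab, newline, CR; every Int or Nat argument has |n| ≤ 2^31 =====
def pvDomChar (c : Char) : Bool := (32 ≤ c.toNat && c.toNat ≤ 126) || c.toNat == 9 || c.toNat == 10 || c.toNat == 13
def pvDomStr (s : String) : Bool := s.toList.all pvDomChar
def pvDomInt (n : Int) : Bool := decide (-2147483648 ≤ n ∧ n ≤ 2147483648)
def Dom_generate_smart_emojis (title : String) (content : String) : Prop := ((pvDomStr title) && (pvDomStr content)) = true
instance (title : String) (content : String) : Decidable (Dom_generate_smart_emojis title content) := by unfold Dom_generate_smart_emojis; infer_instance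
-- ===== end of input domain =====

-- B replaces A's ten independent if-blocks by one ordered keyword table scanned
-- with early exit (each category holds exactly 3 emojis, so only the first match
-- matters); equivalence of the RETURN value is proved on all inputs (idiomatic).

-- ===== PORT A =====
def generate_smart_emojis (title : String) (content : String) : List String :=
  let combined_text := PySem.Str.lower title ++ " " ++ PySem.Str.lower content
  let emojis : List String := []
  let emojis := if ["ai", "artificial intelligence", "robot", "machine learning"].any (fun k => PySem.Str.isIn k combined_text) then emojis ++ ["🤖", "🧠", "⚡"] else emojis
  let emojis := if ["funding", "investment", "billion", "million", "money"].any (fun k => PySem.Str.isIn k combined_text) then emojis ++ ["💰", "💸", "📈"] else emojis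
  let emojis := if ["launch", "release", "unveil", "announce"].any (fun k => PySem.Str.isIn k combined_text) then emojis ++ ["🚀", "🎉", "✨"] else emojis
  let emojis := if ["research", "development", "breakthrough", "discovery"].any (fun k => PySem.Str.isIn k combined_text) then emojis ++ ["🔬", "💡", "🧪"] else emojis
  let emojis := if ["security", "privacy", "protection", "safe"].any (fun k => PySem.Str.isIn k combined_text) then emojis ++ ["🔒", "🛡️", "🔐"] else emojis
  let emojis := if ["acquisition", "merger", "partnership"].any (fun k => PySem.Str.isIn k combined_text) then emojis ++ ["🤝", "🔗", "💼"] else emojis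
  let emojis := if ["search", "query", "find", "discover"].any (fun k => PySem.Str.isIn k combined_text) then emojis ++ ["🔍", "🔎", "📊"] else emojis
  let emojis := if ["mobile", "phone", "app", "smartphone"].any (fun k => PySem.Str.isIn k combined_text) then emojis ++ ["📱", "📲", "💻"] else emojis
  let emojis := if ["cloud", "server", "data", "storage"].any (fun k => PySem.Str.isIn k combined_text) then emojis ++ ["☁️", "💾", "🗄️"] else emojis
  let emojis := if ["game", "gaming", "entertainment"].any (fun k => PySem.Str.isIn k combined_text) then emojis ++ ["🎮", "🕹️", "🎯"] else emojis
  let emojis := if emojis = [] then ["🚀", "💻", "🌟", "⚡", "🔥"] else emojis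
  PySem.List.slice emojis none (some 3)   -- emojis[:3]

-- ===== PORT B =====
def emojiTable : List (List String × List String) :=
  [ (["ai", "artificial intelligence", "robot", "machine learning"], ["🤖", "🧠", "⚡"]),
    (["funding", "investment", "billion", "million", "money"], ["💰", "💸", "📈"]),
    (["launch", "release", "unveil", "announce"], ["🚀", "🎉", "✨"]),
    (["research", "development", "breakthrough", "discovery"], ["🔬", "💡", "🧪"]),
    (["security", "privacy", "protection", "safe"], ["🔒", "🛡️", "🔐"]),
    (["acquisition", "merger", "partnership"], ["🤝", "🔗", "💼"]),
    (["search", "query", "find", "discover"], ["🔍", "🔎", "📊"]),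
    (["mobile", "phone", "app", "smartphone"], ["📱", "📲", "💻"]),
    (["cloud", "server", "data", "storage"], ["☁️", "💾", "🗄️"]),
    (["game", "gaming", "entertainment"], ["🎮", "🕹️", "🎯"]) ]

def pickRow (rows : List (List String × List String)) (text : String) : List String :=
  match rows with
  | [] => ["🚀", "💻", "🌟"]
  | (kws, trio) :: rest =>
      if kws.any (fun k => PySem.Str.isIn k text) then trio else pickRow rest text

def generate_smart_emojis_alt (title : String) (content : String) : List String :=
  pickRow emojiTable (PySem.Str.lower title ++ " " ++ PySem.Str.lower content)

-- ===== PRECONDITION & SPEC =====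
def Spec_generate_smart_emojis (title : String) (content : String) (out : List String) : Prop := out = generate_smart_emojis_alt title content
instance (title : String) (content : String) (out : List String) : Decidable (Spec_generate_smart_emojis title content out) := by unfold Spec_generate_smart_emojis; infer_instance

-- ===== CLAIM (what is proved, stated in full; the proofs are below) =====
def Claim_equal_generate_smart_emojis : Prop := ∀ (title : String) (content : String), Dom_generate_smart_emojis title content → Spec_generate_smart_emojis title content (generate_smart_emojis title content)

-- ===== LEMMAS AND PROOFS =====

/-- One step of A's emoji accumulation, viewed as a fold over the table. -/
def emojiStep (text : String) (acc : List String) (r : List String × List String) : List String :=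
  if r.1.any (fun k => PySem.Str.isIn k text) then acc ++ r.2 else acc

lemma foldl_emojiStep_append (text : String) :
    ∀ (rows : List (List String × List String)) (acc : List String),
      ∃ s, List.foldl (emojiStep text) acc rows = acc ++ s := by
  intro rows
  induction rows with
  | nil => intro acc; exact ⟨[], by simp⟩
  | cons r rest ih =>
      intro acc
      simp only [List.foldl_cons, emojiStep]
      split
      · obtain ⟨s, hs⟩ := ih (acc ++ r.2)
        exact ⟨r.2 ++ s, by simp [hs]⟩
      · exact ih acc

lemma fold_take_eq_pickRow (text : String) :
    ∀ (rows : List (List String × List String)), (∀ r ∈ rows, r.2.length = 3) →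
      (if List.foldl (emojiStep text) [] rows = [] then ["🚀", "💻", "🌟", "⚡", "🔥"]
       else List.foldl (emojiStep text) [] rows).take 3 = pickRow rows text := by
  intro rows
  induction rows with
  | nil => intro _; simp [pickRow]
  | cons r rest ih =>
      intro h3
      obtain ⟨kws, trio⟩ := r
      have htrio : trio.length = 3 := h3 (kws, trio) (by simp)
      simp only [List.foldl_cons, emojiStep, pickRow]
      by_cases hc : kws.any (fun k => PySem.Str.isIn k text) = true
      · simp only [hc, if_true]
        obtain ⟨s, hs⟩ := foldl_emojiStep_append text rest trio
        simp only [List.nil_append]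
        rw [hs]
        have hne : trio ++ s ≠ [] := by
          intro h; have := congrArg List.length h; simp [htrio] at this
        rw [if_neg hne, List.take_append_of_le_length (by omega), List.take_of_length_le (by omega)]
      · simp only [hc]
        exact ih (fun r hr => h3 r (by simp [hr]))

lemma generate_smart_emojis_eq_fold (title content : String) :
    generate_smart_emojis title content =
      (let e := List.foldl (emojiStep (PySem.Str.lower title ++ " " ++ PySem.Str.lower content)) [] emojiTable
       PySem.List.slice (if e = [] then ["🚀", "💻", "🌟", "⚡", "🔥"] else e) none (some 3)) := by
  simp only [generate_smart_emojis, emojiTable, List.foldl, emojiStep, List.nil_append]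

-- ===== VERDICT (by name: the statement is the Claim_ definition above) =====
theorem generate_smart_emojis_spec : Claim_equal_generate_smart_emojis := by
  intro title content _
  unfold Spec_generate_smart_emojis generate_smart_emojis_alt
  rw [generate_smart_emojis_eq_fold]
  rw [PySem.List.slice_to _ (by norm_num)]
  rw [show ((3 : Int).toNat) = 3 from rfl]
  exact fold_take_eq_pickRow _ emojiTable (by decide)
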